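-- pv_equiv track=rewrite | github.com/LordBao666/MITLecture6.0001_Introduction_To_CS_Programing_In_Python | practice/5structured_types_mutabillity_and_higher_order_functions/analyze_song_lyrics.py | common_words
-- ===== SOURCE A (Python) =====
-- def common_words(freq_dictionary, min_times):
--     """
--
--     :param freq_dictionary: freq_dictionary: 类型为字典，key 为string，代表歌词，value为 int，代表频率
--     :param min_times: 最低要求出现频率
--     :return: 返回dictionary,key为int，表示频度。value为list，表示频度为k的所有单词
--     """
--     dictionary = {}
--     for k in freq_dictionary:
--         if freq_dictionary[k] >= min_times:
--             if freq_dictionary[k] in dictionary: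
--                 dictionary[freq_dictionary[k]].append(k)
--             else:
--                 dictionary[freq_dictionary[k]] = [k]
--     return dictionary
-- ===== SOURCE B (Python) =====
-- def common_words(freq_dictionary, min_times):
--     # Phase 1: distinct qualifying frequencies, in order of first occurrence.
--     seen = set()
--     freqs = []
--     for f in freq_dictionary.values():
--         if f >= min_times and f not in seen:
--             seen.add(f)
--             freqs.append(f)
--     # Phase 2: one bucket per frequency, words in original order.
--     return {f: [w for w, g in freq_dictionary.items() if g == f] for f in freqs}
-- ===== Notes on version B (the rewrite author's own statement) =====
-- stated objective: alternative
-- what changed: A builds the answer in one pass, appending each word into a per-frequency bucket dict; B first collects the distinct qualifying frequencies in first-occurrence order and then builds each bucket with a separate comprehension over the items.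
import Mathlib
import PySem

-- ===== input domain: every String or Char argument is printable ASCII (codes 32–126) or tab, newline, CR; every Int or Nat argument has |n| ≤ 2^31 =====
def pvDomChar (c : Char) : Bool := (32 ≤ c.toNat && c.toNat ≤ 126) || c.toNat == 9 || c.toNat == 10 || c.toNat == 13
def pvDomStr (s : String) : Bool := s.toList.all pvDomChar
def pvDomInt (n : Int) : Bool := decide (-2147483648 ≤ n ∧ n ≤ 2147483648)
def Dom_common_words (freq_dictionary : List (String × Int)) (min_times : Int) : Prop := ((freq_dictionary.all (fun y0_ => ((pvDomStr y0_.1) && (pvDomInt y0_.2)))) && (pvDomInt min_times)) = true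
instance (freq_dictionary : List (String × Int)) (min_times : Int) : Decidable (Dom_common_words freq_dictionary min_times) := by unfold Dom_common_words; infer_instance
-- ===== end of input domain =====

-- B changes the decomposition (two phases instead of one bucket-appending pass); equivalence of return values on dict inputs (no duplicate keys).

-- ===== PORT A =====
-- `for k in freq_dictionary` over the dict, `freq_dictionary[k]` looked up with getD 0:
-- exact under Pre_ (keys Nodup), since every k iterated is a present key.
def common_words (freq_dictionary : List (String × Int)) (min_times : Int) : List (Int × List String) :=
  let fdict : PySem.Dict String Int := PySem.Dict.mk freq_dictionary
  let dict : PySem.Dict Int (List String) :=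
    fdict.keys.foldl (fun dict k =>
      let f := fdict.getD k 0
      if min_times ≤ f then
        match dict.get? f with
        | some ws => dict.insert f (ws ++ [k])
        | none => dict.insert f [k]
      else dict) PySem.Dict.empty
  dict.items

-- ===== PORT B =====
def common_words_alt (freq_dictionary : List (String × Int)) (min_times : Int) : List (Int × List String) :=
  let fdict : PySem.Dict String Int := PySem.Dict.mk freq_dictionary
  let st :=
    fdict.values.foldl (fun (st : PySem.Set Int × List Int) f =>
      if min_times ≤ f ∧ ¬ f ∈ st.1 then (PySem.Set.add st.1 f, st.2 ++ [f]) else st)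
      (PySem.Set.empty, [])
  st.2.map (fun f => (f, fdict.items.filterMap (fun p => if p.2 == f then some p.1 else none)))

-- ===== PRECONDITION & SPEC =====
-- Pre_ excludes association lists with duplicate string keys: the parameter is a Python dict,
-- which cannot hold duplicate keys, so such lists do not encode any input of A.
def Pre_common_words (freq_dictionary : List (String × Int)) (min_times : Int) : Prop :=
  (freq_dictionary.map Prod.fst).Nodup
instance (freq_dictionary : List (String × Int)) (min_times : Int) : Decidable (Pre_common_words freq_dictionary min_times) := by unfold Pre_common_words; infer_instance
def pvWitness_common_words : (List (String × Int)) × Int := ([("a", 2), ("b", 1), ("c", 2)], 2)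
def Spec_common_words (freq_dictionary : List (String × Int)) (min_times : Int) (out : List (Int × List String)) : Prop := out = common_words_alt freq_dictionary min_times
instance (freq_dictionary : List (String × Int)) (min_times : Int) (out : List (Int × List String)) : Decidable (Spec_common_words freq_dictionary min_times out) := by unfold Spec_common_words; infer_instance

-- ===== CLAIM (what is proved, stated in full; the proofs are below) =====
def Claim_equal_common_words : Prop := ∀ (freq_dictionary : List (String × Int)) (min_times : Int), Dom_common_words freq_dictionary min_times → Pre_common_words freq_dictionary min_times → Spec_common_words freq_dictionary min_times (common_words freq_dictionary min_times)

-- ===== LEMMAS AND PROOFS =====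

-- A's branch (lookup, append-or-seed, insert) is dict.modify.
lemma branch_eq_modify (d : PySem.Dict Int (List String)) (f : Int) (k : String) :
    (match d.get? f with
      | some ws => d.insert f (ws ++ [k])
      | none => d.insert f [k]) = d.modify f [] (· ++ [k]) := by
  rw [PySem.Dict.modify]
  cases h : d.get? f <;> simp [PySem.Dict.getD_eq_get?_getD, h]

-- A's whole fold, rewritten over the swapped filtered pairs.
lemma portA_eq (fd : List (String × Int)) (mt : Int) (hnd : (fd.map Prod.fst).Nodup) :
    common_words fd mt =
      (((fd.filter (fun p => decide (mt ≤ p.2))).map Prod.swap).foldl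
        (fun d p => d.modify p.1 [] (· ++ [p.2])) PySem.Dict.empty).items := by
  unfold common_words
  show (List.foldl _ PySem.Dict.empty (PySem.Dict.mk fd).keys).items = _
  rw [show (PySem.Dict.mk fd).keys = fd.map Prod.fst from rfl, List.foldl_map,
    List.foldl_map, List.foldl_filter]
  congr 1
  apply PySem.List.foldl_congr_mem
  intro acc p hp
  have hv : (PySem.Dict.mk fd).getD p.1 0 = p.2 :=
    PySem.Dict.getD_of_mem_items _ (by simpa using hp) hnd 0
  rw [hv]
  have hstep : (if mt ≤ p.2 then
        match acc.get? p.2 with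
        | some ws => acc.insert p.2 (ws ++ [p.1])
        | none => acc.insert p.2 [p.1]
      else acc)
      = if decide (mt ≤ p.2) = true then acc.modify p.swap.1 [] (fun x => x ++ [p.swap.2]) else acc := by
    by_cases h : mt ≤ p.2
    · simpa [h] using branch_eq_modify acc p.2 p.1
    · simp [h]
  exact hstep

lemma portB_freqs (fd : List (String × Int)) (mt : Int) :
    ((fd.map Prod.snd).foldl (fun (st : PySem.Set Int × List Int) f =>
      if mt ≤ f ∧ ¬ f ∈ st.1 then (PySem.Set.add st.1 f, st.2 ++ [f]) else st)
      (PySem.Set.empty, [])).2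
    = PySem.Set.ofList ((fd.filter (fun p => decide (mt ≤ p.2))).map Prod.snd) := by
  have key : ∀ (l : List Int) (s : PySem.Set Int),
      l.foldl (fun (st : PySem.Set Int × List Int) f =>
        if mt ≤ f ∧ ¬ f ∈ st.1 then (PySem.Set.add st.1 f, st.2 ++ [f]) else st) (s, s)
      = ((l.filter (fun f => decide (mt ≤ f))).foldl PySem.Set.add s,
         (l.filter (fun f => decide (mt ≤ f))).foldl PySem.Set.add s) := by
    intro l
    induction l with
    | nil => intro s; rfl
    | cons f l ih =>
      intro s
      by_cases hq : mt ≤ f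
      · by_cases hm : f ∈ s
        · simp [hq, hm, ih]
        · simp [hq, hm, ih]
      · simp [hq, ih]
  rw [show ((PySem.Set.empty : PySem.Set Int), ([] : List Int))
        = ((PySem.Set.empty : PySem.Set Int), (PySem.Set.empty : PySem.Set Int)) from rfl,
    key, List.filter_map]
  simp only [PySem.Set.ofList_eq_foldl, List.foldl_map]
  congr 1

lemma filterMap_if {A B : Type} (l : List A) (p : A → Bool) (g : A → B) :
    l.filterMap (fun x => if p x then some (g x) else none) = (l.filter p).map g := by
  induction l with
  | nil => rfl
  | cons a l ih => by_cases h : p a <;> simp [h, ih]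

lemma buckets_eq (fd : List (String × Int)) (mt : Int) (f : Int) (hf : mt ≤ f) :
    ((((fd.filter (fun p => decide (mt ≤ p.2))).map Prod.swap).filter (fun p => p.1 == f)).map (fun x => x.2))
      = fd.filterMap (fun p => if p.2 == f then some p.1 else none) := by
  have hfil : (fd.filter (fun p => decide (mt ≤ p.2))).filter ((fun p => p.1 == f) ∘ Prod.swap)
      = fd.filter (fun p => p.2 == f) := by
    rw [List.filter_filter]
    apply List.filter_congr
    intro p _
    by_cases h : p.2 = f
    · simp [h, hf]
    · simp [h]
  rw [List.filter_map, List.map_map, hfil, filterMap_if]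
  rfl

-- ===== VERDICT (by name: the statement is the Claim_ definition above) =====
theorem common_words_spec : Claim_equal_common_words := by
  intro fd mt _ hpre
  unfold Spec_common_words
  rw [portA_eq fd mt hpre]
  unfold common_words_alt
  show _ = (((fd.map Prod.snd).foldl (fun (st : PySem.Set Int × List Int) f =>
      if mt ≤ f ∧ ¬ f ∈ st.1 then (PySem.Set.add st.1 f, st.2 ++ [f]) else st)
      (PySem.Set.empty, [])).2).map
      (fun f => (f, fd.filterMap (fun p => if p.2 == f then some p.1 else none)))
  rw [portB_freqs]
  have hnd2 : ((((fd.filter (fun p => decide (mt ≤ p.2))).map Prod.swap).foldl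
      (fun d p => d.modify p.1 [] (· ++ [p.2])) PySem.Dict.empty).keys).Nodup := by
    apply PySem.Dict.nodup_keys_foldl_modify_key _ Prod.fst [] (fun _ p => (· ++ [p.2]))
    simp
  rw [PySem.Dict.items_eq_map_keys _ hnd2 [],
    PySem.Dict.keys_foldl_modify_key _ Prod.fst [] (fun _ p => (· ++ [p.2]))]
  have hlists : PySem.Set.update (PySem.Dict.empty : PySem.Dict Int (List String)).keys
        (((fd.filter (fun p => decide (mt ≤ p.2))).map Prod.swap).map Prod.fst)
      = PySem.Set.ofList ((fd.filter (fun p => decide (mt ≤ p.2))).map Prod.snd) := by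
    rw [List.map_map]
    simp [PySem.Set.update_nil_left, Function.comp_def]
  rw [hlists]
  apply List.map_congr_left
  intro f hfmem
  have hf : mt ≤ f := by
    rw [PySem.Set.mem_ofList, List.mem_map] at hfmem
    obtain ⟨p, hp, rfl⟩ := hfmem
    simpa using (List.mem_filter.mp hp).2
  rw [PySem.Dict.getD_foldl_modify_append]
  simp only [PySem.Dict.getD_empty, List.nil_append]
  rw [buckets_eq fd mt f hf]
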